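-- pv_equiv track=rewrite | github.com/geo171br-afk/tjsptelegrambot | main.py | agrupar_por_ano
-- ===== SOURCE A (Python) =====
-- def agrupar_por_ano(processos):
--     """Agrupa processos por ano"""
--     anos = {}
--     for processo in processos:
--         ano = processo['ano']
--         if ano not in anos:
--             anos[ano] = []
--         anos[ano].append(processo)
--     return dict(sorted(anos.items(), reverse=True))
-- ===== SOURCE B (Python) =====
-- def agrupar_por_ano(processos):
--     """Agrupa processos por ano"""
--     anos_distintos = sorted({p['ano'] for p in processos}, reverse=True)
--     return {ano: [p for p in processos if p['ano'] == ano] for ano in anos_distintos}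
-- ===== Notes on version B (the rewrite author's own statement) =====
-- stated objective: alternative
-- what changed: B first computes the sorted-descending distinct years and then builds each group by filtering the input once per year, instead of accumulating a dict of per-year lists and sorting its items at the end.
import Mathlib
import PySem

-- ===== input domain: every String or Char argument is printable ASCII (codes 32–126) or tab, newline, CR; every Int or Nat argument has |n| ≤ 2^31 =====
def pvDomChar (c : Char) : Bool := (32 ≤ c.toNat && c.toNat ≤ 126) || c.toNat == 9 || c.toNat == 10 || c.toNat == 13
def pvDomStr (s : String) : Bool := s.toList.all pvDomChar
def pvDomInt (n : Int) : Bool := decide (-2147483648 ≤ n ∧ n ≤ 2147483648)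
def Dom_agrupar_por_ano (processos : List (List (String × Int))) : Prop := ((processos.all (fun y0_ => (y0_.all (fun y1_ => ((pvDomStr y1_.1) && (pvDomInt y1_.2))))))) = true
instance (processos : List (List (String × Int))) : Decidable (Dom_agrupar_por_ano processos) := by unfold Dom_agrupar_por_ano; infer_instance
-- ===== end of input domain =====

-- B groups by filtering the input once per distinct year (sorted descending) instead of
-- accumulating a dict of per-year lists and sorting its items; same result, different decomposition.

-- ===== PORT A =====
-- processo['ano'] — first-match lookup in the record; the default 0 is unreachable under Pre_
def pvAno (p : List (String × Int)) : Int := (PySem.Dict.mk p).getD "ano" 0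

def agrupar_por_ano (processos : List (List (String × Int))) : List (Int × List (List (String × Int))) :=
  let anos := processos.foldl (fun anos processo =>
    let ano := pvAno processo
    -- if ano not in anos: anos[ano] = []
    let anos := if anos.contains ano then anos else anos.insert ano []
    -- anos[ano].append(processo)  (the key is present here, so modify's default is unused)
    anos.modify ano [] (· ++ [processo])) PySem.Dict.empty
  -- sorted(anos.items(), reverse=True): keys are distinct, so tuple comparison = comparison on the key
  PySem.List.sorted anos.items (fun p => p.1) true

-- ===== PORT B =====
def agrupar_por_ano_alt (processos : List (List (String × Int))) : List (Int × List (List (String × Int))) :=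
  let anos_distintos := PySem.List.sorted (PySem.Set.ofList (processos.map pvAno)) (fun y => y) true
  anos_distintos.map (fun ano => (ano, processos.filter (fun p => pvAno p == ano)))

-- ===== PRECONDITION & SPEC =====
-- A raises KeyError on any record without an 'ano' key; Pre_ requires the key in every record.
def Pre_agrupar_por_ano (processos : List (List (String × Int))) : Prop :=
  ∀ p ∈ processos, (PySem.Dict.mk p).contains "ano" = true
instance (processos : List (List (String × Int))) : Decidable (Pre_agrupar_por_ano processos) := by unfold Pre_agrupar_por_ano; infer_instance
def pvWitness_agrupar_por_ano : (List (List (String × Int))) := [[("ano", 2020)], [("ano", 2019), ("n", 7)], [("ano", 2020)]]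

def Spec_agrupar_por_ano (processos : List (List (String × Int))) (out : List (Int × List (List (String × Int)))) : Prop := out = agrupar_por_ano_alt processos
instance (processos : List (List (String × Int))) (out : List (Int × List (List (String × Int)))) : Decidable (Spec_agrupar_por_ano processos out) := by unfold Spec_agrupar_por_ano; infer_instance

-- ===== CLAIM (what is proved, stated in full; the proofs are below) =====
def Claim_equal_agrupar_por_ano : Prop := ∀ (processos : List (List (String × Int))), Dom_agrupar_por_ano processos → Pre_agrupar_por_ano processos → Spec_agrupar_por_ano processos (agrupar_por_ano processos)

-- ===== LEMMAS AND PROOFS =====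

-- A's loop body: inserting [] when the key is absent and then appending = appending to the default []
lemma step_eq_modify (d : PySem.Dict Int (List (List (String × Int)))) (p : List (String × Int)) :
    ((if d.contains (pvAno p) then d else d.insert (pvAno p) []).modify (pvAno p) [] (· ++ [p]))
      = d.modify (pvAno p) [] (· ++ [p]) := by
  by_cases h : d.contains (pvAno p)
  · simp [h]
  · simp only [h, Bool.false_eq_true, ite_false]
    rw [PySem.Dict.modify, PySem.Dict.modify, PySem.Dict.getD_insert_self,
      PySem.Dict.insert_insert_self, PySem.Dict.getD_of_not_contains d [] (by simpa using h)]

lemma keys_fold (processos : List (List (String × Int))) :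
    ((processos.map (fun p => (pvAno p, p))).foldl (fun d q => d.modify q.1 [] (· ++ [q.2])) PySem.Dict.empty).keys
      = PySem.Set.ofList (processos.map pvAno) := by
  have h := PySem.Dict.keys_foldl_modify_key (processos.map (fun p => (pvAno p, p)))
    (fun q => q.1) [] (fun _ q v => v ++ [q.2]) PySem.Dict.empty
  simpa [PySem.Set.update, PySem.Set.ofList_eq_foldl, PySem.Dict.keys_empty,
    List.map_map, Function.comp_def] using h

lemma nodup_fold (processos : List (List (String × Int))) :
    ((processos.map (fun p => (pvAno p, p))).foldl (fun d q => d.modify q.1 [] (· ++ [q.2])) PySem.Dict.empty).keys.Nodup := by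
  have h := PySem.Dict.nodup_keys_foldl_modify_key (processos.map (fun p => (pvAno p, p)))
    (fun q => q.1) [] (fun _ q v => v ++ [q.2]) PySem.Dict.empty (by simp [PySem.Dict.keys_empty])
  simpa using h

lemma getD_fold (processos : List (List (String × Int))) (c : Int) :
    ((processos.map (fun p => (pvAno p, p))).foldl (fun d q => d.modify q.1 [] (· ++ [q.2])) PySem.Dict.empty).getD c []
      = processos.filter (fun p => pvAno p == c) := by
  rw [PySem.Dict.getD_foldl_modify_append]
  simp [List.filter_map, Function.comp_def]

-- sorting the (key, group) pairs by key = mapping the sorted distinct keys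
lemma sorted_pairs_eq (processos : List (List (String × Int))) :
    PySem.List.sorted
        ((PySem.Set.ofList (processos.map pvAno)).map
          (fun k => (k, processos.filter (fun p => pvAno p == k)))) (fun p => p.1) true
      = (PySem.List.sorted (PySem.Set.ofList (processos.map pvAno)) (fun y => y) true).map
          (fun ano => (ano, processos.filter (fun p => pvAno p == ano))) := by
  set S := PySem.Set.ofList (processos.map pvAno) with hS
  apply PySem.List.sorted_rev_eq_of_perm_of_pairwise_gt
  · exact (PySem.List.sorted_perm S (fun y => y) true).map _
  · rw [List.pairwise_map]
    have hle := PySem.List.sorted_pairwise_rev S (fun y => y)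
    have hnd : (PySem.List.sorted S (fun y => y) true).Nodup :=
      ((PySem.List.sorted_perm S (fun y => y) true).nodup_iff).mpr (PySem.Set.nodup_ofList _)
    exact (hle.and hnd).imp (fun h => lt_of_le_of_ne h.1 h.2.symm)

-- ===== VERDICT (by name: the statement is the Claim_ definition above) =====
theorem agrupar_por_ano_spec : Claim_equal_agrupar_por_ano := by
  intro processos _ _
  unfold Spec_agrupar_por_ano agrupar_por_ano agrupar_por_ano_alt
  simp only []
  -- turn A's loop into a single-modify fold over (key, record) pairs
  have hfold : processos.foldl (fun anos processo =>
        (if anos.contains (pvAno processo) then anos else anos.insert (pvAno processo) []).modify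
          (pvAno processo) [] (· ++ [processo])) PySem.Dict.empty
      = (processos.map (fun p => (pvAno p, p))).foldl
          (fun d q => d.modify q.1 [] (· ++ [q.2])) PySem.Dict.empty := by
    rw [List.foldl_map]
    simp only [step_eq_modify]
  rw [hfold]
  rw [PySem.Dict.items_eq_map_keys _ (nodup_fold processos) []]
  rw [keys_fold]
  rw [List.map_congr_left (fun k _ => by rw [getD_fold processos k])]
  exact sorted_pairs_eq processos
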